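-- pv_equiv track=rewrite | github.com/alexanderdavide/advent-of-code-2020 | day20/20a.py | get_tiles_borders
-- ===== SOURCE A (Python) =====
-- def get_tiles_borders(lines):
--     tiles_borders = {}  # {[t, r, b, l], ..}
--     curr_tile_line = 0
--     curr_tile_id = None
--
--     for line in lines:
--         if line.startswith("T"):
--             curr_tile_id = line[5:-1]
--             tiles_borders[curr_tile_id] = ["", "", "", ""]
--         elif line == "":
--             curr_tile_line = 0
--             curr_tile_id = None
--         else:
--             if curr_tile_line == 0:
--                 tiles_borders[curr_tile_id][0] = line
--                 tiles_borders[curr_tile_id][1] += line[-1]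
--                 tiles_borders[curr_tile_id][3] += line[0]
--             elif curr_tile_line == 9:
--                 tiles_borders[curr_tile_id][2] = line
--                 tiles_borders[curr_tile_id][1] += line[-1]
--                 tiles_borders[curr_tile_id][3] += line[0]
--             else:
--                 tiles_borders[curr_tile_id][1] += line[-1]
--                 tiles_borders[curr_tile_id][3] += line[0]
--             curr_tile_line += 1
--
--     return tiles_borders
-- ===== SOURCE B (Python) =====
-- def get_tiles_borders(lines):
--     # pass 1: group the data lines of each tile under its id
--     groups = {}
--     rows = None
--     for line in lines:
--         if line.startswith("T"):
--             rows = groups[line[5:-1]] = []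
--         elif line == "":
--             rows = None
--         else:
--             rows.append(line)
--     # pass 2: read the four borders off each tile's rows
--     return {
--         tid: [
--             rows[0] if rows else "",
--             "".join(r[-1] for r in rows),
--             rows[9] if len(rows) > 9 else "",
--             "".join(r[0] for r in rows),
--         ]
--         for tid, rows in groups.items()
--     }
-- ===== Notes on version B (the rewrite author's own statement) =====
-- stated objective: alternative
-- what changed: B groups each tile's raw data lines under its id in one pass and then reads the four borders (first row, last chars, row 9, first chars) off each tile's rows in a second pass, instead of A's interleaved per-line incremental border string-building driven by a running line counter; Pre_ excludes only inputs where a data line appears with no current tile, on which A raises KeyError (and B raises AttributeError).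
-- intended difference: On inputs where a tile header is encountered while A's running line counter is nonzero (the counter is only reset by blank lines, not by headers), the header is followed by data lines, and no later header reuses that tile id, A returns an empty top border and a misplaced or empty bottom border for that tile, while B returns the tile's actual first row (and row 9 if present), which is the intended border extraction. — e.g. on get_tiles_borders(["Tile 1:", "ab", "Tile 2:", "cd"]): A returns [("1", ["ab", "b", "", "a"]), ("2", ["", "d", "", "c"])], B returns [("1", ["ab", "b", "", "a"]), ("2", ["cd", "d", "", "c"])]
import Mathlib
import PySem

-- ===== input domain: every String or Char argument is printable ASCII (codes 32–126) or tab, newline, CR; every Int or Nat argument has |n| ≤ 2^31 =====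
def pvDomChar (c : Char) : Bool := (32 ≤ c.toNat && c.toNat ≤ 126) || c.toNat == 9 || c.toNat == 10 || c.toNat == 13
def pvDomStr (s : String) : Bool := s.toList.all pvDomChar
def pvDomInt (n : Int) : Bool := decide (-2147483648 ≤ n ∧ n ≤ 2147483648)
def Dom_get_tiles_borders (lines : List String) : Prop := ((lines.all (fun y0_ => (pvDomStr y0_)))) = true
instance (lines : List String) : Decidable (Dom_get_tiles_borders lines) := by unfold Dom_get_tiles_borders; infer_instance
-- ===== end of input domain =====

-- B groups each tile's raw data lines under its id first and reads the four borders off each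
-- tile's rows in a second pass (objective: alternative decomposition); on tiles whose header is
-- reached with A's stale nonzero line counter B returns the intended borders (see D_ below).

-- shared small helpers (exact ports of the Python expressions):
-- line[-1] / line[0]; every call site has line ≠ "" (Python would raise on "", which no call site reaches)
def pvLastChar (s : String) : Char := (PySem.Str.pyGet? s (-1)).getD ' '
def pvFirstChar (s : String) : Char := (PySem.Str.pyGet? s 0).getD ' '
-- string s + one-character string of c (Python str concatenation, expressed over code points)
def pvPush (s : String) (c : Char) : String := String.ofList (s.toList ++ [c])
-- "".join(h(r) for r in rows) where h yields one character
def pvJoinChars (h : String → Char) (rows : List String) : String :=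
  PySem.Str.join "" (rows.map (fun r => String.ofList [h r]))

-- line.startswith("T") and line[5:-1], named once and used by both ports
def pvIsHeader (s : String) : Bool := PySem.Str.startswith s "T"
def pvKey (s : String) : String := PySem.Str.slice s (some 5) (some (-1))

-- ===== PORT A =====
-- loop state: (tiles_borders, curr_tile_line, curr_tile_id); dict values are always the
-- 4-element border lists A creates, so the modify functions match on [t, r, b, l]
def pvStepA (st : PySem.Dict String (List String) × Int × Option String) (line : String) :
    PySem.Dict String (List String) × Int × Option String :=
  let (tb, n, cid) := st
  if pvIsHeader line then
    let id := pvKey line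
    (tb.insert id ["", "", "", ""], n, some id)
  else if line = "" then
    (tb, 0, none)
  else
    match cid with
    | none => (tb, n, none)   -- Python raises KeyError here; excluded by Pre_
    | some k =>
      let tb' :=
        if n = 0 then
          tb.modify k ["", "", "", ""] (fun v => match v with
            | [_t, r, b, l] => [line, pvPush r (pvLastChar line), b, pvPush l (pvFirstChar line)]
            | v => v)
        else if n = 9 then
          tb.modify k ["", "", "", ""] (fun v => match v with
            | [t, r, _b, l] => [t, pvPush r (pvLastChar line), line, pvPush l (pvFirstChar line)]
            | v => v)
        else
          tb.modify k ["", "", "", ""] (fun v => match v with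
            | [t, r, b, l] => [t, pvPush r (pvLastChar line), b, pvPush l (pvFirstChar line)]
            | v => v)
      (tb', n + 1, some k)

def get_tiles_borders (lines : List String) : List (String × List String) :=
  (lines.foldl pvStepA (PySem.Dict.empty, 0, none)).1.items

-- ===== PORT B =====
-- pass 1: groups : tile id -> its data lines, cur : the current tile's id (None after a blank)
def pvStepN (st : PySem.Dict String (List String) × Option String) (line : String) :
    PySem.Dict String (List String) × Option String :=
  let (g, cur) := st
  if pvIsHeader line then
    let id := pvKey line
    (g.insert id [], some id)
  else if line = "" then
    (g, none)
  else
    match cur with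
    | none => (g, none)   -- Python raises AttributeError here; excluded by Pre_
    | some k => (g.modify k [] (fun rs => rs ++ [line]), some k)

-- the four border expressions of B's dict comprehension
def pvNatBorders (rows : List String) : List String :=
  [rows.headD "",
   pvJoinChars pvLastChar rows,
   if 9 < rows.length then rows.getD 9 "" else "",
   pvJoinChars pvFirstChar rows]

def get_tiles_borders_alt (lines : List String) : List (String × List String) :=
  -- pass 2: the dict comprehension over groups.items(); keys are already distinct,
  -- so the rebuilt dict's items are exactly this map
  ((lines.foldl pvStepN (PySem.Dict.empty, none)).1.items).map (fun p => (p.1, pvNatBorders p.2))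

-- ===== PRECONDITION & SPEC =====
-- Pre_ excludes exactly the inputs on which both Pythons raise (A: KeyError, B: AttributeError):
-- a non-header, non-blank data line that is not preceded by a tile header since the last blank line.
def Pre_get_tiles_borders (lines : List String) : Prop :=
  ∀ i < lines.length,
    (lines.getD i "" ≠ "" ∧ pvIsHeader (lines.getD i "") = false) →
    ∃ j < i, pvIsHeader (lines.getD j "") = true ∧
      ∀ k < i, j < k → lines.getD k "" ≠ ""
instance (lines : List String) : Decidable (Pre_get_tiles_borders lines) := by
  unfold Pre_get_tiles_borders; infer_instance

def pvWitness_get_tiles_borders : List String :=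
  ["Tile 7:", "#.", "..", "", "Tile 13:", ".#"]

-- On inputs where a tile header arrives while A's running line counter is nonzero (it is reset
-- only by blank lines, never by headers), is followed by data lines, and no later header reuses
-- the same id, A returns "" as that tile's top border (and a misplaced or empty bottom), while B
-- returns the tile's actual first row (and row 9 if present) — the intended border extraction.
def D_get_tiles_borders (lines : List String) : Prop :=
  ∃ i < lines.length, ∃ j < i,
    pvIsHeader (lines.getD i "") = true ∧
    pvIsHeader (lines.getD j "") = false ∧
    i + 1 < lines.length ∧
    pvIsHeader (lines.getD (i + 1) "") = false ∧
    (∀ m < i + 2, j ≤ m → lines.getD m "" ≠ "") ∧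
    ∀ m < lines.length, i < m → pvIsHeader (lines.getD m "") = true →
      pvKey (lines.getD m "") ≠ pvKey (lines.getD i "")
instance (lines : List String) : Decidable (D_get_tiles_borders lines) := by
  unfold D_get_tiles_borders; infer_instance

def Spec_get_tiles_borders (lines : List String) (out : List (String × List String)) : Prop :=
  ¬ D_get_tiles_borders lines → out = get_tiles_borders_alt lines
instance (lines : List String) (out : List (String × List String)) : Decidable (Spec_get_tiles_borders lines out) := by unfold Spec_get_tiles_borders; infer_instance

def pvDiffWitness_get_tiles_borders : List String := ["Tile 1:", "ab", "Tile 2:", "cd"]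
def pvDiffWitnessOut_get_tiles_borders : (List (String × List String)) × (List (String × List String)) :=
  ([("1", ["ab", "b", "", "a"]), ("2", ["", "d", "", "c"])],
   [("1", ["ab", "b", "", "a"]), ("2", ["cd", "d", "", "c"])])

-- ===== CLAIM (what is proved, stated in full; the proofs are below) =====
def Claim_unchanged_get_tiles_borders : Prop := ∀ (lines : List String), Dom_get_tiles_borders lines → Pre_get_tiles_borders lines → Spec_get_tiles_borders lines (get_tiles_borders lines)
def Claim_changed_get_tiles_borders : Prop := Dom_get_tiles_borders (pvDiffWitness_get_tiles_borders) ∧ Pre_get_tiles_borders (pvDiffWitness_get_tiles_borders) ∧ D_get_tiles_borders (pvDiffWitness_get_tiles_borders) ∧ get_tiles_borders (pvDiffWitness_get_tiles_borders) = pvDiffWitnessOut_get_tiles_borders.1 ∧ get_tiles_borders_alt (pvDiffWitness_get_tiles_borders) = pvDiffWitnessOut_get_tiles_borders.2 ∧ pvDiffWitnessOut_get_tiles_borders.1 ≠ pvDiffWitnessOut_get_tiles_borders.2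
def Claim_exact_get_tiles_borders : Prop := ∀ (lines : List String), Dom_get_tiles_borders lines → Pre_get_tiles_borders lines → D_get_tiles_borders lines → get_tiles_borders lines ≠ get_tiles_borders_alt lines

-- ===== LEMMAS AND PROOFS =====

-- A's loop, instrumented for the proof: B's grouping dict additionally carrying, per tile,
-- the counter value A had when its header was seen
def pvStepB (st : PySem.Dict String (Int × List String) × Int × Option String) (line : String) :
    PySem.Dict String (Int × List String) × Int × Option String :=
  let (g, n, cid) := st
  if pvIsHeader line then
    let id := pvKey line
    (g.insert id (n, []), n, some id)
  else if line = "" then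
    (g, 0, none)
  else
    match cid with
    | none => (g, n, none)
    | some k =>
      (g.modify k (0, []) (fun p => (p.1, p.2 ++ [line])), n + 1, some k)

-- the borders A has accumulated for a tile whose header was seen at counter s with data lines rows
def pvTop (s : Int) (rows : List String) : String :=
  if s = 0 ∧ rows ≠ [] then rows.headD "" else ""
def pvBottom (s : Int) (rows : List String) : String :=
  if 0 ≤ 9 - s ∧ 9 - s < (rows.length : Int) then rows.getD (9 - s).toNat "" else ""
def pvBorders (p : Int × List String) : List String :=
  [pvTop p.1 p.2, pvJoinChars pvLastChar p.2, pvBottom p.1 p.2, pvJoinChars pvFirstChar p.2]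

-- rendering the instrumented state into A's border state
def renderD (g : PySem.Dict String (Int × List String)) : PySem.Dict String (List String) :=
  PySem.Dict.mk (g.items.map (fun p => (p.1, pvBorders p.2)))
-- dropping the counters yields B's grouping state
def dropS (g : PySem.Dict String (Int × List String)) : PySem.Dict String (List String) :=
  PySem.Dict.mk (g.items.map (fun p => (p.1, p.2.2)))

lemma get?_renderD (g : PySem.Dict String (Int × List String)) (k : String) :
    (renderD g).get? k = (g.get? k).map pvBorders := by
  unfold renderD PySem.Dict.get?
  simp only [List.find?_map]
  have : ((fun p : String × List String => p.1 == k) ∘ fun p : String × (Int × List String) => (p.1, pvBorders p.2))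
      = fun p : String × (Int × List String) => p.1 == k := by funext p; rfl
  rw [this]
  cases List.find? (fun p : String × (Int × List String) => p.1 == k) g.items <;> rfl

lemma contains_renderD (g : PySem.Dict String (Int × List String)) (k : String) :
    (renderD g).contains k = g.contains k := by
  rw [PySem.Dict.contains_eq_isSome_get?, PySem.Dict.contains_eq_isSome_get?, get?_renderD]
  cases g.get? k <;> rfl

lemma renderD_insert (g : PySem.Dict String (Int × List String)) (k : String) (v : Int × List String) :
    renderD (g.insert k v) = (renderD g).insert k (pvBorders v) := by
  unfold PySem.Dict.insert
  rw [contains_renderD]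
  by_cases hc : g.contains k = true
  · simp only [hc, if_pos]
    unfold renderD
    simp only [List.map_map]
    congr 1
    apply List.map_congr_left
    intro p _
    by_cases hp : p.1 = k
    · simp [hp]
    · simp [hp]
  · simp only [hc]
    unfold renderD
    simp

lemma get?_dropS (g : PySem.Dict String (Int × List String)) (k : String) :
    (dropS g).get? k = (g.get? k).map (fun p => p.2) := by
  unfold dropS PySem.Dict.get?
  simp only [List.find?_map]
  have : ((fun p : String × List String => p.1 == k) ∘ fun p : String × (Int × List String) => (p.1, p.2.2))
      = fun p : String × (Int × List String) => p.1 == k := by funext p; rfl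
  rw [this]
  cases List.find? (fun p : String × (Int × List String) => p.1 == k) g.items <;> rfl

lemma contains_dropS (g : PySem.Dict String (Int × List String)) (k : String) :
    (dropS g).contains k = g.contains k := by
  rw [PySem.Dict.contains_eq_isSome_get?, PySem.Dict.contains_eq_isSome_get?, get?_dropS]
  cases g.get? k <;> rfl

lemma dropS_insert (g : PySem.Dict String (Int × List String)) (k : String) (v : Int × List String) :
    dropS (g.insert k v) = (dropS g).insert k v.2 := by
  unfold PySem.Dict.insert
  rw [contains_dropS]
  by_cases hc : g.contains k = true
  · simp only [hc, if_pos]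
    unfold dropS
    simp only [List.map_map]
    congr 1
    apply List.map_congr_left
    intro p _
    by_cases hp : p.1 = k
    · simp [hp]
    · simp [hp]
  · simp only [hc]
    unfold dropS
    simp

lemma dropS_modify (g : PySem.Dict String (Int × List String)) (k : String) (line : String) :
    dropS (g.modify k (0, []) (fun p => (p.1, p.2 ++ [line]))) =
      (dropS g).modify k [] (fun rs => rs ++ [line]) := by
  unfold PySem.Dict.modify
  rw [dropS_insert]
  congr 1
  rw [PySem.Dict.getD_eq_get?_getD, PySem.Dict.getD_eq_get?_getD, get?_dropS]
  cases g.get? k <;> rfl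

lemma pvJoinChars_eq (h : String → Char) (rows : List String) :
    pvJoinChars h rows = String.ofList (rows.map h) := by
  unfold pvJoinChars PySem.Str.join
  congr 1
  rw [List.map_map]
  have : (String.toList ∘ fun r => String.ofList [h r]) = fun r => [h r] := by
    funext r; simp
  rw [this]
  have := PySem.Chars.join_nil_singletons (rows.map h)
  rw [List.map_map] at this
  simpa using this

lemma pvBorders_nil (n : Int) : pvBorders (n, []) = ["", "", "", ""] := by
  unfold pvBorders pvTop pvBottom
  have h1 : ¬(n = 0 ∧ ([] : List String) ≠ []) := by simp
  have h2 : ¬(0 ≤ 9 - n ∧ 9 - n < (([] : List String).length : Int)) := by simp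
  rw [if_neg h1, if_neg h2, pvJoinChars_eq, pvJoinChars_eq]
  simp

lemma pvJoinChars_snoc (h : String → Char) (rows : List String) (line : String) :
    pvJoinChars h (rows ++ [line]) = pvPush (pvJoinChars h rows) (h line) := by
  rw [pvJoinChars_eq, pvJoinChars_eq]
  unfold pvPush
  simp

lemma pvTop_snoc (s : Int) (ls : List String) (line : String) (h : ¬(s = 0 ∧ ls = [])) :
    pvTop s (ls ++ [line]) = pvTop s ls := by
  unfold pvTop
  by_cases hs : s = 0
  · have hls : ls ≠ [] := by intro he; exact h ⟨hs, he⟩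
    simp [hs, hls]
    cases ls with
    | nil => exact absurd rfl hls
    | cons a t => rfl
  · simp [hs]

lemma pvBottom_snoc (s : Int) (ls : List String) (line : String)
    (h : s + (ls.length : Int) ≠ 9) :
    pvBottom s (ls ++ [line]) = pvBottom s ls := by
  unfold pvBottom
  by_cases hc : 0 ≤ 9 - s ∧ 9 - s < (ls.length : Int)
  · have hc' : 0 ≤ 9 - s ∧ 9 - s < ((ls ++ [line]).length : Int) := by
      simp; omega
    rw [if_pos hc', if_pos hc]
    have hlt : (9 - s).toNat < ls.length := by omega
    rw [List.getD_eq_getElem?_getD, List.getD_eq_getElem?_getD,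
        List.getElem?_append_left hlt]
  · by_cases hc' : 0 ≤ 9 - s ∧ 9 - s < ((ls ++ [line]).length : Int)
    · exfalso; simp at hc'; omega
    · rw [if_neg hc', if_neg hc]

lemma pvBottom_snoc9 (s : Int) (ls : List String) (line : String)
    (h : s + (ls.length : Int) = 9) :
    pvBottom s (ls ++ [line]) = line := by
  unfold pvBottom
  have hc : 0 ≤ 9 - s ∧ 9 - s < ((ls ++ [line]).length : Int) := by simp; omega
  rw [if_pos hc]
  have h9 : (9 - s).toNat = ls.length := by omega
  rw [h9, List.getD_eq_getElem?_getD]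
  simp

-- one data line appended to a tile's rows changes the four borders exactly as A's n-branches do
lemma borders_step (s : Int) (ls : List String) (line : String) (hs0 : 0 ≤ s) :
    pvBorders (s, ls ++ [line]) =
      if s + (ls.length : Int) = 0 then
        [line, pvPush (pvJoinChars pvLastChar ls) (pvLastChar line), pvBottom s ls,
          pvPush (pvJoinChars pvFirstChar ls) (pvFirstChar line)]
      else if s + (ls.length : Int) = 9 then
        [pvTop s ls, pvPush (pvJoinChars pvLastChar ls) (pvLastChar line), line,
          pvPush (pvJoinChars pvFirstChar ls) (pvFirstChar line)]
      else
        [pvTop s ls, pvPush (pvJoinChars pvLastChar ls) (pvLastChar line), pvBottom s ls,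
          pvPush (pvJoinChars pvFirstChar ls) (pvFirstChar line)] := by
  have hlen : (0 : Int) ≤ (ls.length : Int) := by positivity
  split_ifs with h0 h9
  · have hs : s = 0 := by omega
    have hls : ls = [] := by
      have : ls.length = 0 := by omega
      simpa using this
    subst hs; subst hls
    simp [pvBorders, pvTop, pvBottom, pvJoinChars_eq, pvPush]
  · have hne : ¬(s = 0 ∧ ls = []) := by
      rintro ⟨hs, hls⟩; subst hs; subst hls; simp at h9
    simp only [pvBorders]
    rw [pvJoinChars_snoc, pvJoinChars_snoc, pvTop_snoc s ls line hne, pvBottom_snoc9 s ls line h9]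
  · have hne : ¬(s = 0 ∧ ls = []) := by
      rintro ⟨hs, hls⟩; subst hs; subst hls; simp at h0
    simp only [pvBorders]
    rw [pvJoinChars_snoc, pvJoinChars_snoc, pvTop_snoc s ls line hne, pvBottom_snoc s ls line h9]

-- A's fold is the rendering of the instrumented fold
lemma loop_eq (rest : List String) (g : PySem.Dict String (Int × List String))
    (n : Int) (cid : Option String) (hn : 0 ≤ n)
    (hcid : ∀ k, cid = some k →
      ∃ s ls, g.get? k = some (s, ls) ∧ 0 ≤ s ∧ s + (ls.length : Int) = n) :
    rest.foldl pvStepA (renderD g, n, cid) =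
      (renderD (rest.foldl pvStepB (g, n, cid)).1, (rest.foldl pvStepB (g, n, cid)).2) := by
  induction rest generalizing g n cid with
  | nil => simp
  | cons line rest ih =>
    simp only [List.foldl_cons]
    by_cases hT : pvIsHeader line = true
    · have hA : pvStepA (renderD g, n, cid) line =
          (renderD (g.insert (pvKey line) (n, [])), n,
            some (pvKey line)) := by
        simp only [pvStepA, hT, if_pos]
        rw [renderD_insert, pvBorders_nil]
      have hB : pvStepB (g, n, cid) line =
          (g.insert (pvKey line) (n, []), n,
            some (pvKey line)) := by
        simp only [pvStepB, hT, if_pos]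
      rw [hA, hB]
      apply ih _ _ _ hn
      intro k hk
      cases hk
      exact ⟨n, [], PySem.Dict.get?_insert_self _ _ _, hn, by simp⟩
    · by_cases hE : line = ""
      · have hA : pvStepA (renderD g, n, cid) line = (renderD g, 0, none) := by
          simp only [pvStepA]
          rw [if_neg hT, if_pos hE]
        have hB : pvStepB (g, n, cid) line = (g, 0, none) := by
          simp only [pvStepB]
          rw [if_neg hT, if_pos hE]
        rw [hA, hB]
        apply ih _ _ _ le_rfl
        intro k hk; cases hk
      · cases cid with
        | none =>
          have hA : pvStepA (renderD g, n, none) line = (renderD g, n, none) := by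
            simp only [pvStepA]
            rw [if_neg hT, if_neg hE]
          have hB : pvStepB (g, n, none) line = (g, n, none) := by
            simp only [pvStepB]
            rw [if_neg hT, if_neg hE]
          rw [hA, hB]
          apply ih _ _ _ hn
          intro k hk; cases hk
        | some k =>
          obtain ⟨s, ls, hget, hs0, hsum⟩ := hcid k rfl
          have hlen : (0 : Int) ≤ (ls.length : Int) := by positivity
          have hgetR : (renderD g).get? k = some (pvBorders (s, ls)) := by
            rw [get?_renderD, hget]; rfl
          have hgetDR : (renderD g).getD k ["", "", "", ""] = pvBorders (s, ls) := by
            simp [PySem.Dict.getD, hgetR]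
          have hgetDB : g.getD k (0, []) = (s, ls) := by
            simp [PySem.Dict.getD, hget]
          have hB : pvStepB (g, n, some k) line =
              (g.insert k (s, ls ++ [line]), n + 1, some k) := by
            simp only [pvStepB]
            rw [if_neg hT, if_neg hE]
            simp [PySem.Dict.modify, hgetDB]
          have hA : pvStepA (renderD g, n, some k) line =
              (renderD (g.insert k (s, ls ++ [line])), n + 1, some k) := by
            simp only [pvStepA]
            rw [if_neg hT, if_neg hE]
            rw [renderD_insert, borders_step s ls line hs0, hsum]
            by_cases h0 : n = 0
            · simp [PySem.Dict.modify, hgetDR, pvBorders, h0]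
            · by_cases h9 : n = 9
              · simp [PySem.Dict.modify, hgetDR, pvBorders, h9]
              · simp [PySem.Dict.modify, hgetDR, pvBorders, h0, h9]
          rw [hA, hB]
          apply ih _ _ _ (by omega)
          intro k' hk'
          cases hk'
          refine ⟨s, ls ++ [line], PySem.Dict.get?_insert_self _ _ _, hs0, ?_⟩
          simp
          omega

-- B's fold is the instrumented fold with the counters dropped
lemma loopN_eq (rest : List String) (g : PySem.Dict String (Int × List String))
    (n : Int) (cid : Option String) :
    rest.foldl pvStepN (dropS g, cid) =
      (dropS (rest.foldl pvStepB (g, n, cid)).1, (rest.foldl pvStepB (g, n, cid)).2.2) := by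
  induction rest generalizing g n cid with
  | nil => simp
  | cons line rest ih =>
    simp only [List.foldl_cons]
    by_cases hT : pvIsHeader line = true
    · have hN : pvStepN (dropS g, cid) line =
          (dropS (g.insert (pvKey line) (n, [])),
            some (pvKey line)) := by
        simp only [pvStepN, hT, if_pos]
        rw [dropS_insert]
      have hB : pvStepB (g, n, cid) line =
          (g.insert (pvKey line) (n, []), n,
            some (pvKey line)) := by
        simp only [pvStepB, hT, if_pos]
      rw [hN, hB]; exact ih _ n _
    · by_cases hE : line = ""
      · have hN : pvStepN (dropS g, cid) line = (dropS g, none) := by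
          simp only [pvStepN]; rw [if_neg hT, if_pos hE]
        have hB : pvStepB (g, n, cid) line = (g, 0, none) := by
          simp only [pvStepB]; rw [if_neg hT, if_pos hE]
        rw [hN, hB]; exact ih _ 0 _
      · cases cid with
        | none =>
          have hN : pvStepN (dropS g, none) line = (dropS g, none) := by
            simp only [pvStepN]; rw [if_neg hT, if_neg hE]
          have hB : pvStepB (g, n, none) line = (g, n, none) := by
            simp only [pvStepB]; rw [if_neg hT, if_neg hE]
          rw [hN, hB]; exact ih _ n _
        | some k =>
          have hN : pvStepN (dropS g, some k) line =
              (dropS (g.modify k (0, []) (fun p => (p.1, p.2 ++ [line]))), some k) := by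
            simp only [pvStepN]; rw [if_neg hT, if_neg hE]
            rw [dropS_modify]
          have hB : pvStepB (g, n, some k) line =
              (g.modify k (0, []) (fun p => (p.1, p.2 ++ [line])), n + 1, some k) := by
            simp only [pvStepB]; rw [if_neg hT, if_neg hE]
          rw [hN, hB]; exact ih _ (n + 1) _

-- where the tile's header was seen at counter 0, or no data line followed, A's accumulated
-- borders are exactly B's batch extraction
lemma borders_agree (s : Int) (rows : List String) (h : s = 0 ∨ rows = []) :
    pvBorders (s, rows) = pvNatBorders rows := by
  rcases h with h | h
  · subst h
    unfold pvBorders pvNatBorders pvTop pvBottom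
    simp only [sub_zero]
    congr 1
    · cases rows with
      | nil => simp
      | cons a t => simp
    congr 2
    by_cases h9 : (9 : Int) < (rows.length : Int)
    · have h9' : 9 < rows.length := by exact_mod_cast h9
      rw [if_pos ⟨by norm_num, h9⟩, if_pos h9']
      simp
    · have h9' : ¬ 9 < rows.length := by
        intro hc; exact h9 (by exact_mod_cast hc)
      rw [if_neg (by intro hc; exact h9 hc.2), if_neg h9']
  · subst h
    rw [pvBorders_nil]
    unfold pvNatBorders
    rw [pvJoinChars_eq, pvJoinChars_eq]
    simp

-- a header line is nonempty
lemma header_ne_empty (s : String) (h : pvIsHeader s = true) : s ≠ "" := by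
  intro he; subst he
  have : pvIsHeader "" = false := by decide
  rw [this] at h; cases h

-- "A's running counter is nonzero at position p": a data line since the last blank before p
def CntNZ (lines : List String) (p : Nat) : Prop :=
  ∃ j < p, (lines.getD j "" ≠ "" ∧ pvIsHeader (lines.getD j "") = false) ∧
    ∀ m < p, j < m → lines.getD m "" ≠ ""

lemma cntNZ_succ {lines : List String} {p : Nat} (h : CntNZ lines p)
    (hne : lines.getD p "" ≠ "") : CntNZ lines (p + 1) := by
  obtain ⟨j, hj, hd, hall⟩ := h
  refine ⟨j, by omega, hd, ?_⟩
  intro m hm hjm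
  by_cases hmp : m = p
  · subst hmp; exact hne
  · exact hall m (by omega) hjm

-- the D_ witness restricted to the first p lines
def BadAt (lines : List String) (p : Nat) (k : String) : Prop :=
  ∃ i, i + 1 < p ∧ pvIsHeader (lines.getD i "") = true ∧
    pvKey (lines.getD i "") = k ∧
    CntNZ lines i ∧
    (lines.getD (i + 1) "" ≠ "" ∧ pvIsHeader (lines.getD (i + 1) "") = false) ∧
    (∀ m < p, i < m → pvIsHeader (lines.getD m "") = true →
      pvKey (lines.getD m "") ≠ k)

lemma badAt_succ {lines : List String} {p : Nat} {k : String} (h : BadAt lines p k)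
    (hp : pvIsHeader (lines.getD p "") = true →
      pvKey (lines.getD p "") ≠ k) :
    BadAt lines (p + 1) k := by
  obtain ⟨i, hi, hh, hk, hc, hd, hall⟩ := h
  refine ⟨i, by omega, hh, hk, hc, hd, ?_⟩
  intro m hm him hT
  by_cases hmp : m = p
  · subst hmp; exact hp hT
  · exact hall m (by omega) him hT

-- the invariant of the instrumented fold after p lines
def pvInv (lines : List String) (p : Nat)
    (st : PySem.Dict String (Int × List String) × Int × Option String) : Prop :=
  (st.2.1 ≠ 0 → CntNZ lines p) ∧
  (∀ q ∈ st.1.items, q.2.1 ≠ 0 → q.2.2 ≠ [] → BadAt lines p q.1) ∧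
  (∀ k, st.2.2 = some k →
    ∃ i s rows, st.1.get? k = some (s, rows) ∧
      i < p ∧ pvIsHeader (lines.getD i "") = true ∧
      pvKey (lines.getD i "") = k ∧
      (∀ m < p, i < m → pvIsHeader (lines.getD m "") = true →
        pvKey (lines.getD m "") ≠ k) ∧
      (s ≠ 0 → CntNZ lines i) ∧
      (rows ≠ [] → (lines.getD (i + 1) "" ≠ "" ∧
        pvIsHeader (lines.getD (i + 1) "") = false)) ∧
      p = i + 1 + rows.length)

lemma inv_step (lines : List String) (p : Nat)
    (st : PySem.Dict String (Int × List String) × Int × Option String)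
    (hInv : pvInv lines p st) :
    pvInv lines (p + 1) (pvStepB st (lines.getD p "")) := by
  obtain ⟨hA, hB, hC⟩ := hInv
  obtain ⟨g, n, cid⟩ := st
  set line := lines.getD p "" with hline
  by_cases hT : pvIsHeader line = true
  · -- header
    have hstep : pvStepB (g, n, cid) line =
        (g.insert (pvKey line) (n, []), n,
          some (pvKey line)) := by
      simp only [pvStepB, hT, if_pos]
    rw [hstep]
    refine ⟨fun hn => cntNZ_succ (hA hn) (header_ne_empty _ hT), ?_, ?_⟩
    · intro q hq hs hr
      rcases (PySem.Dict.mem_items_insert _ _ _ _).1 hq with hq | ⟨hq, hne⟩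
      · subst hq; simp at hr
      · exact badAt_succ (hB q hq hs hr) (fun _ h => (hne h.symm).elim)
    · intro k hk
      injection hk with hk
      subst hk
      refine ⟨p, n, [], PySem.Dict.get?_insert_self _ _ _, by omega, hT, rfl, ?_, ?_, by simp, by simp⟩
      · intro m hm hpm _; omega
      · intro hn; exact hA hn
  · by_cases hE : line = ""
    · -- blank
      have hstep : pvStepB (g, n, cid) line = (g, 0, none) := by
        simp only [pvStepB]; rw [if_neg hT, if_pos hE]
      rw [hstep]
      refine ⟨fun hn => absurd rfl hn, ?_, ?_⟩
      · intro q hq hs hr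
        exact badAt_succ (hB q hq hs hr) (fun h => absurd h hT)
      · intro k hk; cases hk
    · cases cid with
      | none =>
        have hstep : pvStepB (g, n, none) line = (g, n, none) := by
          simp only [pvStepB]; rw [if_neg hT, if_neg hE]
        rw [hstep]
        refine ⟨fun hn => cntNZ_succ (hA hn) hE, ?_, ?_⟩
        · intro q hq hs hr
          exact badAt_succ (hB q hq hs hr) (fun h => absurd h hT)
        · intro k hk; cases hk
      | some k =>
        obtain ⟨i, s, rows, hget, hip, hih, hik, hnoh, hcnt, hdat, hpos⟩ := hC k rfl
        have hgetD : g.getD k (0, []) = (s, rows) := by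
          simp [PySem.Dict.getD, hget]
        have hstep : pvStepB (g, n, some k) line =
            (g.insert k (s, rows ++ [line]), n + 1, some k) := by
          simp only [pvStepB]; rw [if_neg hT, if_neg hE]
          simp [PySem.Dict.modify, hgetD]
        rw [hstep]
        -- the first data line after header i sits at i+1
        have hdat' : lines.getD (i + 1) "" ≠ "" ∧
            pvIsHeader (lines.getD (i + 1) "") = false := by
          cases rows with
          | nil =>
            have : p = i + 1 := by simpa using hpos
            rw [← this]
            exact ⟨hE, by simpa using hT⟩
          | cons a t => exact hdat (by simp)
        refine ⟨?_, ?_, ?_⟩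
        · intro _
          exact ⟨p, by omega, ⟨hE, by simpa using hT⟩, fun m hm hpm => by omega⟩
        · intro q hq hs hr
          rcases (PySem.Dict.mem_items_insert _ _ _ _).1 hq with hq | ⟨hq, hne⟩
          · subst hq
            refine ⟨i, by omega, hih, hik, hcnt hs, hdat', ?_⟩
            intro m hm him hTm
            by_cases hmp : m = p
            · subst hmp; exact absurd hTm (by simpa using hT)
            · exact hnoh m (by omega) him hTm
          · exact badAt_succ (hB q hq hs hr) (fun h => absurd h hT)
        · intro k' hk'
          injection hk' with hk'
          subst hk'
          refine ⟨i, s, rows ++ [line], PySem.Dict.get?_insert_self _ _ _, by omega, hih, hik,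
            ?_, hcnt, fun _ => hdat', by simp; omega⟩
          intro m hm him hTm
          by_cases hmp : m = p
          · subst hmp; exact absurd hTm (by simpa using hT)
          · exact hnoh m (by omega) him hTm

lemma take_succ_getD {lines : List String} {p : Nat} (hp : p < lines.length) :
    lines.take (p + 1) = lines.take p ++ [lines.getD p ""] := by
  rw [List.take_add_one]
  congr 1
  rw [List.getD_eq_getElem?_getD, List.getElem?_eq_getElem hp]
  rfl

lemma inv_final (lines : List String) :
    pvInv lines lines.length (lines.foldl pvStepB (PySem.Dict.empty, 0, none)) := by
  suffices h : ∀ n ≤ lines.length,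
      pvInv lines n ((lines.take n).foldl pvStepB (PySem.Dict.empty, 0, none)) by
    have := h lines.length le_rfl
    simpa using this
  intro n hn
  induction n with
  | zero =>
    refine ⟨fun h => absurd rfl h, ?_, ?_⟩
    · intro q hq; simp [PySem.Dict.empty] at hq
    · intro k hk; cases hk
  | succ m ih =>
    have hm : m < lines.length := by omega
    rw [take_succ_getD hm, List.foldl_append]
    simpa using inv_step lines m _ (ih (by omega))

lemma badAt_D (lines : List String) (k : String) (h : BadAt lines lines.length k) :
    D_get_tiles_borders lines := by
  obtain ⟨i, hi, hih, hik, ⟨j, hj, hjd, hjall⟩, hd, hall⟩ := h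
  refine ⟨i, by omega, j, hj, hih, hjd.2, by omega, hd.2, ?_, ?_⟩
  · intro m hm hjm
    by_cases hmj : m = j
    · rw [hmj]; exact hjd.1
    · by_cases hmi : m = i
      · rw [hmi]; exact header_ne_empty _ hih
      · by_cases hmi1 : m = i + 1
        · rw [hmi1]; exact hd.1
        · exact hjall m (by omega) (by omega)
  · intro m hm him hTm
    rw [hik]
    exact hall m hm him hTm


-- a header was seen since the last blank before position p (what Pre_ guarantees at data lines)
def pvHdrSince (lines : List String) (p : Nat) : Prop :=
  ∃ j < p, pvIsHeader (lines.getD j "") = true ∧ ∀ m < p, j < m → lines.getD m "" ≠ ""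

-- the counter and current-id components of the instrumented fold, characterised syntactically
lemma counter_state (lines : List String) (hpre : Pre_get_tiles_borders lines) :
    ∀ p ≤ lines.length,
      0 ≤ ((lines.take p).foldl pvStepB (PySem.Dict.empty, 0, none)).2.1 ∧
      (((lines.take p).foldl pvStepB (PySem.Dict.empty, 0, none)).2.2.isSome = true ↔
        pvHdrSince lines p) ∧
      (CntNZ lines p → ((lines.take p).foldl pvStepB (PySem.Dict.empty, 0, none)).2.1 ≠ 0) := by
  intro p hp
  induction p with
  | zero =>
    refine ⟨le_rfl, ?_, ?_⟩
    · simp only [List.take_zero, List.foldl_nil]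
      constructor
      · intro h; cases h
      · rintro ⟨j, hj, -⟩; omega
    · rintro ⟨j, hj, -⟩; omega
  | succ m ih =>
    have hm : m < lines.length := by omega
    obtain ⟨ih0, ih1, ih2⟩ := ih (by omega)
    rw [take_succ_getD hm, List.foldl_append, List.foldl_cons, List.foldl_nil]
    set st := (lines.take m).foldl pvStepB (PySem.Dict.empty, 0, none) with hst
    obtain ⟨g, n, cid⟩ := st
    simp only at ih0 ih1 ih2
    set line := lines.getD m "" with hline
    by_cases hT : pvIsHeader line = true
    · have hstep : pvStepB (g, n, cid) line = (g.insert (pvKey line) (n, []), n, some (pvKey line)) := by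
        simp only [pvStepB, hT, if_pos]
      rw [hstep]
      refine ⟨ih0, ?_, ?_⟩
      · simp only [Option.isSome_some, true_iff]
        exact ⟨m, by omega, hT, fun m' hm' hmm' => by omega⟩
      · rintro ⟨j, hj, hjd, hall⟩ h0
        by_cases hjm : j = m
        · rw [hjm] at hjd; rw [hjd.2] at hT; cases hT
        · exact ih2 ⟨j, by omega, hjd, fun m' hm' hjm' => hall m' (by omega) hjm'⟩ h0
    · by_cases hE : line = ""
      · have hstep : pvStepB (g, n, cid) line = (g, 0, none) := by
          simp only [pvStepB]; rw [if_neg hT, if_pos hE]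
        rw [hstep]
        refine ⟨le_rfl, ?_, ?_⟩
        · refine iff_of_false (by simp) ?_
          rintro ⟨j, hj, hjh, hall⟩
          by_cases hjm : j = m
          · rw [hjm] at hjh; rw [← hline, hE] at hjh; cases hjh
          · exact hall m (by omega) (by omega) hE
        · rintro ⟨j, hj, hjd, hall⟩
          by_cases hjm : j = m
          · rw [hjm] at hjd; exact absurd hE hjd.1
          · exact absurd (hall m (by omega) (by omega)) (fun hc => hc hE)
      · -- data line: Pre_ gives a header since the last blank, so cid is some id
        have hhs : pvHdrSince lines m :=
          hpre m hm ⟨hE, by simpa using hT⟩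
        have hsome : cid.isSome = true := ih1.mpr hhs
        obtain ⟨kk, hkk⟩ := Option.isSome_iff_exists.1 hsome
        subst hkk
        have hstep : pvStepB (g, n, some kk) line =
            (g.modify kk (0, []) (fun p => (p.1, p.2 ++ [line])), n + 1, some kk) := by
          simp only [pvStepB]; rw [if_neg hT, if_neg hE]
        rw [hstep]
        refine ⟨show (0 : Int) ≤ n + 1 by omega, ?_, fun _ => show n + 1 ≠ 0 by omega⟩
        refine iff_of_true rfl ?_
        obtain ⟨j, hj, hjh, hall⟩ := hhs
        refine ⟨j, by omega, hjh, ?_⟩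
        intro m' hm' hjm'
        by_cases hmm : m' = m
        · rw [hmm]; exact hE
        · exact hall m' (by omega) hjm'

-- once tile k holds (s, rows) with first row h1 and no later header reuses id k,
-- the fold only ever appends to rows
def Phi (k : String) (s : Int) (h1 : String)
    (st : PySem.Dict String (Int × List String) × Int × Option String) : Prop :=
  ∃ rows, st.1.get? k = some (s, rows) ∧ rows ≠ [] ∧ rows.headD "" = h1

lemma phi_step (k : String) (s : Int) (h1 : String)
    (st : PySem.Dict String (Int × List String) × Int × Option String) (line : String)
    (hline : pvIsHeader line = true → pvKey line ≠ k) (h : Phi k s h1 st) :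
    Phi k s h1 (pvStepB st line) := by
  obtain ⟨g, n, cid⟩ := st
  obtain ⟨rows, hget, hne, hhd⟩ := h
  by_cases hT : pvIsHeader line = true
  · have hkne : k ≠ pvKey line := fun hc => (hline hT) hc.symm
    have hstep : pvStepB (g, n, cid) line = (g.insert (pvKey line) (n, []), n, some (pvKey line)) := by
      simp only [pvStepB, hT, if_pos]
    rw [hstep]
    exact ⟨rows, by rw [PySem.Dict.get?_insert_of_ne _ _ hkne]; exact hget, hne, hhd⟩
  · by_cases hE : line = ""
    · have hstep : pvStepB (g, n, cid) line = (g, 0, none) := by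
        simp only [pvStepB]; rw [if_neg hT, if_pos hE]
      rw [hstep]
      exact ⟨rows, hget, hne, hhd⟩
    · cases cid with
      | none =>
        have hstep : pvStepB (g, n, none) line = (g, n, none) := by
          simp only [pvStepB]; rw [if_neg hT, if_neg hE]
        rw [hstep]
        exact ⟨rows, hget, hne, hhd⟩
      | some k' =>
        have hstep : pvStepB (g, n, some k') line =
            (g.modify k' (0, []) (fun p => (p.1, p.2 ++ [line])), n + 1, some k') := by
          simp only [pvStepB]; rw [if_neg hT, if_neg hE]
        rw [hstep]
        by_cases hkk : k' = k
        · subst hkk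
          have hgetD : g.getD k' (0, []) = (s, rows) := by
            simp [PySem.Dict.getD, hget]
          refine ⟨rows ++ [line], ?_, by simp, ?_⟩
          · simp only [PySem.Dict.modify, hgetD]
            exact PySem.Dict.get?_insert_self _ _ _
          · cases rows with
            | nil => exact absurd rfl hne
            | cons a t => simpa using hhd
        · refine ⟨rows, ?_, hne, hhd⟩
          simp only [PySem.Dict.modify]
          rw [PySem.Dict.get?_insert_of_ne _ _ (fun hc => hkk hc.symm)]
          exact hget

lemma phi_fold (rest : List String) (k : String) (s : Int) (h1 : String) :
    ∀ st : PySem.Dict String (Int × List String) × Int × Option String,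
      (∀ x ∈ rest, pvIsHeader x = true → pvKey x ≠ k) → Phi k s h1 st →
      Phi k s h1 (rest.foldl pvStepB st) := by
  induction rest with
  | nil => intro st _ h; exact h
  | cons line rest ih =>
    intro st hrest h
    rw [List.foldl_cons]
    exact ih _ (fun x hx => hrest x (List.mem_cons_of_mem line hx))
      (phi_step k s h1 st line (hrest line List.mem_cons_self) h)

-- ===== VERDICT (by name: the statement is the Claim_ definition above) =====
theorem get_tiles_borders_spec : Claim_unchanged_get_tiles_borders := by
  intro lines _ _
  unfold Spec_get_tiles_borders
  intro hnd
  unfold get_tiles_borders get_tiles_borders_alt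
  have hA := loop_eq lines PySem.Dict.empty 0 none le_rfl (by intro k hk; cases hk)
  have hN := loopN_eq lines PySem.Dict.empty 0 none
  have hrempty : renderD PySem.Dict.empty = PySem.Dict.empty := rfl
  have hdempty : dropS PySem.Dict.empty = PySem.Dict.empty := rfl
  rw [hrempty] at hA
  rw [hdempty] at hN
  rw [hA, hN]
  show (renderD (lines.foldl pvStepB (PySem.Dict.empty, 0, none)).1).items =
    ((dropS (lines.foldl pvStepB (PySem.Dict.empty, 0, none)).1).items).map
      (fun p => (p.1, pvNatBorders p.2))
  obtain ⟨-, hB, -⟩ := inv_final lines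
  unfold renderD dropS
  show ((lines.foldl pvStepB (PySem.Dict.empty, 0, none)).1.items.map
      (fun p => (p.1, pvBorders p.2))) =
    (((lines.foldl pvStepB (PySem.Dict.empty, 0, none)).1.items.map
      (fun p => (p.1, p.2.2))).map (fun p => (p.1, pvNatBorders p.2)))
  rw [List.map_map]
  apply List.map_congr_left
  intro q hq
  have hok : q.2.1 = 0 ∨ q.2.2 = [] := by
    by_contra hc
    exact hnd (badAt_D lines q.1 (hB q hq (fun h => hc (Or.inl h)) (fun h => hc (Or.inr h))))
  simp only [Function.comp]
  exact congrArg (fun v => (q.1, v)) (borders_agree q.2.1 q.2.2 hok)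

theorem get_tiles_borders_changed : Claim_changed_get_tiles_borders := by
  unfold Claim_changed_get_tiles_borders; decide

theorem get_tiles_borders_tight : Claim_exact_get_tiles_borders := by
  intro lines _ hpre hD heq
  obtain ⟨i, hilen, j, hji, hih, hjh, hi1len, hi1h, hnb, hnod⟩ := hD
  -- the counter is nonzero when the header at i is read
  obtain ⟨hn0, -, hnz⟩ := counter_state lines hpre i (by omega)
  have hcnt : CntNZ lines i :=
    ⟨j, hji, ⟨hnb j (by omega) le_rfl, hjh⟩, fun m hm hjm => hnb m (by omega) (by omega)⟩
  have hne := hnz hcnt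
  -- run the fold up to position i+2 by hand
  set sti := (lines.take i).foldl pvStepB (PySem.Dict.empty, 0, none) with hsti
  obtain ⟨g, n, cid⟩ := sti
  simp only at hn0 hne
  set k := pvKey (lines.getD i "") with hk
  have hstep1 : pvStepB (g, n, cid) (lines.getD i "") = (g.insert k (n, []), n, some k) := by
    simp only [pvStepB, hih, if_pos, hk]
  have hl1ne : lines.getD (i + 1) "" ≠ "" := hnb (i + 1) (by omega) (by omega)
  have hstep2 : pvStepB (g.insert k (n, []), n, some k) (lines.getD (i + 1) "") =
      ((g.insert k (n, [])).modify k (0, []) (fun p => (p.1, p.2 ++ [lines.getD (i + 1) ""])),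
        n + 1, some k) := by
    simp only [pvStepB]
    rw [if_neg (by simpa using hi1h), if_neg hl1ne]
  have htake2 : lines.take (i + 2) = lines.take i ++ [lines.getD i "", lines.getD (i + 1) ""] := by
    have h1 : lines.take (i + 2) = lines.take (i + 1) ++ [lines.getD (i + 1) ""] :=
      take_succ_getD (by omega)
    have h2 : lines.take (i + 1) = lines.take i ++ [lines.getD i ""] :=
      take_succ_getD (by omega)
    rw [h1, h2, List.append_assoc]
    rfl
  have hfold2 : (lines.take (i + 2)).foldl pvStepB (PySem.Dict.empty, 0, none) =
      ((g.insert k (n, [])).modify k (0, []) (fun p => (p.1, p.2 ++ [lines.getD (i + 1) ""])),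
        n + 1, some k) := by
    rw [htake2, List.foldl_append, ← hsti, List.foldl_cons, List.foldl_cons, List.foldl_nil,
      hstep1, hstep2]
  -- Phi holds there: tile k carries (n, [lines[i+1]])
  have hphi2 : Phi k n (lines.getD (i + 1) "")
      ((lines.take (i + 2)).foldl pvStepB (PySem.Dict.empty, 0, none)) := by
    rw [hfold2]
    refine ⟨[lines.getD (i + 1) ""], ?_, by simp, by simp⟩
    have hgetD : (g.insert k (n, [])).getD k (0, []) = (n, []) := by
      simp [PySem.Dict.getD, PySem.Dict.get?_insert_self]
    simp only [PySem.Dict.modify, hgetD]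
    exact PySem.Dict.get?_insert_self _ _ _
  -- and is preserved to the end: no later header reuses id k
  have hrest : ∀ x ∈ lines.drop (i + 2), pvIsHeader x = true → pvKey x ≠ k := by
    intro x hx hTx
    obtain ⟨t, ht, hxt⟩ := List.mem_iff_getElem.1 hx
    have hlt : i + 2 + t < lines.length := by
      have := ht; simp only [List.length_drop] at this; omega
    have hxe : x = lines.getD (i + 2 + t) "" := by
      rw [List.getD_eq_getElem?_getD, List.getElem?_eq_getElem hlt, ← hxt, List.getElem_drop]
      rfl
    rw [hxe] at hTx ⊢
    exact hnod (i + 2 + t) hlt (by omega) hTx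
  have hphi : Phi k n (lines.getD (i + 1) "")
      (lines.foldl pvStepB (PySem.Dict.empty, 0, none)) := by
    have hsplit : lines.foldl pvStepB (PySem.Dict.empty, 0, none) =
        (lines.drop (i + 2)).foldl pvStepB
          ((lines.take (i + 2)).foldl pvStepB (PySem.Dict.empty, 0, none)) := by
      conv_lhs => rw [← List.take_append_drop (i + 2) lines]
      rw [List.foldl_append]
    rw [hsplit]
    exact phi_fold _ k n _ _ hrest hphi2
  obtain ⟨rows, hget, hrne, hrhd⟩ := hphi
  -- both outputs are maps over the same items list; at the entry for k they must differ
  have hA := loop_eq lines PySem.Dict.empty 0 none le_rfl (by intro k' hk'; cases hk')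
  have hN := loopN_eq lines PySem.Dict.empty 0 none
  have hrempty : renderD PySem.Dict.empty = PySem.Dict.empty := rfl
  have hdempty : dropS PySem.Dict.empty = PySem.Dict.empty := rfl
  rw [hrempty] at hA
  rw [hdempty] at hN
  unfold get_tiles_borders get_tiles_borders_alt at heq
  rw [hA, hN] at heq
  have heq' : ((lines.foldl pvStepB (PySem.Dict.empty, 0, none)).1.items.map
        (fun p => (p.1, pvBorders p.2))) =
      ((lines.foldl pvStepB (PySem.Dict.empty, 0, none)).1.items.map
        (fun p => (p.1, pvNatBorders p.2.2))) := by
    have := heq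
    unfold renderD dropS at this
    simpa [List.map_map, Function.comp] using this
  have hmem : (k, (n, rows)) ∈ (lines.foldl pvStepB (PySem.Dict.empty, 0, none)).1.items :=
    PySem.Dict.mem_items_of_get?_eq_some _ hget
  have hpt := (List.map_eq_map_iff.mp heq') _ hmem
  have hb : pvBorders (n, rows) = pvNatBorders rows := by
    have := congrArg Prod.snd hpt
    simpa using this
  unfold pvBorders pvNatBorders at hb
  have htop : pvTop n rows = rows.headD "" := by
    injection hb
  unfold pvTop at htop
  rw [if_neg (fun hc => hne hc.1)] at htop
  have : rows.headD "" ≠ "" := by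
    rw [hrhd]; exact hl1ne
  exact absurd htop.symm this
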